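-- pv_equiv track=rewrite | github.com/NichakornT/TestGit04 | badgenius/app.py | reduce_to_20_characters
-- ===== SOURCE A (Python) =====
-- def reduce_to_20_characters(original_text):
--     substitution_table = {
--         'aa': 'A', 'ab': 'B', 'ac': 'C', 'ad': 'D',
--         'ba': 'E', 'bb': 'F', 'bc': 'G', 'bd': 'H',
--         'ca': 'I', 'cb': 'J', 'cc': 'K', 'cd': 'L',
--         'da': 'M', 'db': 'N', 'dc': 'O', 'dd': 'P'
--     }
--     reduced_text = ''
--
--     for i in range(0, len(original_text), 2):
--         pair = original_text[i:i + 2]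
--         if pair in substitution_table:
--             reduced_text += substitution_table[pair]
--
--     return reduced_text
-- ===== SOURCE B (Python) =====
-- def reduce_to_20_characters(original_text):
--     # pair up consecutive characters with an iterator; closed-form arithmetic instead of a table
--     it = iter(original_text)
--     out = []
--     for a in it:
--         b = next(it, None)
--         if b is None:
--             break
--         ia = 'abcd'.find(a)
--         ib = 'abcd'.find(b)
--         if ia >= 0 and ib >= 0:
--             out.append(chr(65 + 4 * ia + ib))
--     return ''.join(out)
-- ===== Notes on version B (the rewrite author's own statement) =====
-- stated objective: simpler
-- what changed: Replaced the 16-entry substitution table and index-stepped slicing with a single pass over an iterator that takes characters two at a time and computes the output letter by closed-form arithmetic chr(65 + 4*'abcd'.find(a) + 'abcd'.find(b)).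
import Mathlib
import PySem

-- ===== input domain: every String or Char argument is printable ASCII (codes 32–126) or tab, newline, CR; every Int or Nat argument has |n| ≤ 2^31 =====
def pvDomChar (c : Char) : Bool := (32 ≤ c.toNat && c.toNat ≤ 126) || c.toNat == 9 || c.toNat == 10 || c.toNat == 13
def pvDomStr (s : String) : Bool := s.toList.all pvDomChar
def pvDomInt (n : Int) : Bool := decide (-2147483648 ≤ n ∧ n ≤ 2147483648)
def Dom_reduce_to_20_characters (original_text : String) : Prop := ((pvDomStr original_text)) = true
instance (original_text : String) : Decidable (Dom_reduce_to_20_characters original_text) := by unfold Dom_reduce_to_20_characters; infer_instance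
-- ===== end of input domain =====

-- B replaces A's 16-entry substitution table and index-stepped slicing with a single two-characters-at-a-time
-- pass that computes each output letter arithmetically from the positions of the pair in "abcd" (objective: simpler).

-- ===== PORT A =====
-- Python's substitution_table: a dict literal with (distinct) two-character keys, values as character lists
def pvTable : PySem.Dict (List Char) (List Char) := PySem.Dict.mk
  [ (['a','a'], ['A']), (['a','b'], ['B']), (['a','c'], ['C']), (['a','d'], ['D'])
  , (['b','a'], ['E']), (['b','b'], ['F']), (['b','c'], ['G']), (['b','d'], ['H'])
  , (['c','a'], ['I']), (['c','b'], ['J']), (['c','c'], ['K']), (['c','d'], ['L'])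
  , (['d','a'], ['M']), (['d','b'], ['N']), (['d','c'], ['O']), (['d','d'], ['P']) ]

-- one body of A's for-loop: pair = original_text[i:i+2]; if pair in table: reduced += table[pair]
def pvStepA (cs : List Char) (acc : List Char) (i : Int) : List Char :=
  let pair := PySem.List.slice cs (some i) (some (i + 2))
  match pvTable.get? pair with
  | some v => acc ++ v
  | none => acc

def reduce_to_20_characters (original_text : String) : String :=
  String.ofList
    ((PySem.List.pyRange 0 (PySem.Str.len original_text) 2).foldl (pvStepA original_text.toList) [])

-- ===== PORT B =====
-- 'abcd'.find(c), as an Option (none instead of -1)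
def pvFind (c : Char) : Option Nat := PySem.List.index? ['a','b','c','d'] c

-- the loop of Source B: consume two characters at a time, emit chr(65 + 4*ia + ib) when both are found
def pvGoB : List Char → List Char
  | a :: b :: rest =>
    (match pvFind a, pvFind b with
     | some ia, some ib => [Char.ofNat (65 + 4 * ia + ib)]
     | _, _ => []) ++ pvGoB rest
  | _ => []

def reduce_to_20_characters_alt (original_text : String) : String :=
  String.ofList (pvGoB original_text.toList)

-- ===== PRECONDITION & SPEC =====
def Spec_reduce_to_20_characters (original_text : String) (out : String) : Prop := out = reduce_to_20_characters_alt original_text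
instance (original_text : String) (out : String) : Decidable (Spec_reduce_to_20_characters original_text out) := by unfold Spec_reduce_to_20_characters; infer_instance

-- ===== CLAIM (what is proved, stated in full; the proofs are below) =====
def Claim_equal_reduce_to_20_characters : Prop := ∀ (original_text : String), Dom_reduce_to_20_characters original_text → Spec_reduce_to_20_characters original_text (reduce_to_20_characters original_text)

-- ===== LEMMAS AND PROOFS =====

-- A's table lookup on a two-character key equals B's arithmetic on the "abcd" positions
lemma pvTable_get (a b : Char) : pvTable.get? [a, b] =
    (match pvFind a, pvFind b with
     | some ia, some ib => some [Char.ofNat (65 + 4 * ia + ib)]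
     | _, _ => none) := by
  by_cases ha1 : 'a' = a <;> by_cases ha2 : 'b' = a <;> by_cases ha3 : 'c' = a <;> by_cases ha4 : 'd' = a <;>
    by_cases hb1 : 'a' = b <;> by_cases hb2 : 'b' = b <;> by_cases hb3 : 'c' = b <;> by_cases hb4 : 'd' = b <;>
    first
      | (subst_vars; decide)
      | (subst_vars; simp_all [pvTable, pvFind, PySem.Dict.get?_mk_cons, PySem.Dict.get?, List.find?, List.cons_beq_cons, List.findIdx?, List.findIdx?_cons, beq_iff_eq, beq_eq_false_iff_ne, List.idxOf?, List.findIdx?.go, show ∀ x y : Char, (x==y) = decide (x=y) from fun _ _ => rfl])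

-- a one-character key (the odd trailing slice) never matches a two-character key
lemma pvTable_get_one (a : Char) : pvTable.get? [a] = none := by
  simp [pvTable, PySem.Dict.get?, List.find?]

-- the slice taken at loop index k+1 of a::b::rest is the slice at index k of rest
lemma pvSlice_shift (a b : Char) (rest : List Char) (k : Nat) :
    PySem.List.slice (a :: b :: rest) (some ((2 * k + 2 : Nat) : Int)) (some ((2 * k + 4 : Nat) : Int))
      = PySem.List.slice rest (some ((2 * k : Nat) : Int)) (some ((2 * k + 2 : Nat) : Int)) := by
  rw [PySem.List.slice_natCast, PySem.List.slice_natCast]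
  have hd : (a :: b :: rest).drop (2 * k + 2) = rest.drop (2 * k) := by
    have : 2 * k + 2 = (2 * k) + 1 + 1 := by omega
    rw [this, List.drop_succ_cons, List.drop_succ_cons]
  rw [hd]
  congr 1
  omega

-- Python's range(0, n, 2) as a mapped List.range
lemma pvRangeA (n : Nat) : PySem.List.pyRange 0 (n : Int) 2
    = (List.range ((n + 1) / 2)).map (fun k => ((2 * k : Nat) : Int)) := by
  rw [PySem.List.pyRange_of_pos 0 (n : Int) (by norm_num)]
  have hc : (if (0:Int) < (n:Int) then (((n:Int) - 0 + 2 - 1) / 2).toNat else 0) = (n + 1) / 2 := by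
    split_ifs with h
    · have : ((n:Int) - 0 + 2 - 1) = ((n + 1 : Nat) : Int) := by push_cast; ring
      rw [this, show (2:Int) = ((2:Nat):Int) from rfl, ← Int.natCast_div, Int.toNat_natCast]
    · omega
  rw [hc]
  apply List.map_congr_left
  intro k _
  push_cast
  ring

-- the first loop body on a::b::rest appends exactly B's pair output
lemma pvStepA_head (a b : Char) (rest acc : List Char) :
    pvStepA (a :: b :: rest) acc ((2 * 0 : Nat) : Int)
      = acc ++ (match pvFind a, pvFind b with
                | some ia, some ib => [Char.ofNat (65 + 4 * ia + ib)]
                | _, _ => []) := by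
  unfold pvStepA
  have h2 : ((2 * 0 : Nat) : Int) + 2 = ((2 : Nat) : Int) := by norm_num
  rw [h2, show ((2 * 0 : Nat) : Int) = ((0 : Nat) : Int) from by norm_num, PySem.List.slice_natCast]
  simp only [List.drop_zero, Nat.sub_zero, List.take_succ_cons, List.take_zero]
  simp only [pvTable_get]
  cases pvFind a <;> cases pvFind b <;> simp

-- the loop body at index k+1 of a::b::rest is the loop body at index k of rest
lemma pvStepA_shift (a b : Char) (rest acc : List Char) (k : Nat) :
    pvStepA (a :: b :: rest) acc ((2 * (k + 1) : Nat) : Int)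
      = pvStepA rest acc ((2 * k : Nat) : Int) := by
  unfold pvStepA
  have e1 : ((2 * (k + 1) : Nat) : Int) = ((2 * k + 2 : Nat) : Int) := by push_cast; ring
  have e2 : ((2 * k + 2 : Nat) : Int) + 2 = ((2 * k + 4 : Nat) : Int) := by push_cast; ring
  have e3 : ((2 * k : Nat) : Int) + 2 = ((2 * k + 2 : Nat) : Int) := by push_cast; ring
  rw [e1, e2, e3, pvSlice_shift]

-- A's whole loop produces B's recursion, for any accumulator
lemma pvLoopA (cs : List Char) : ∀ (acc : List Char),
    (List.range ((cs.length + 1) / 2)).foldl (fun acc k => pvStepA cs acc ((2 * k : Nat) : Int)) acc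
      = acc ++ pvGoB cs := by
  induction cs using pvGoB.induct with
  | case1 a b rest ih =>
    intro acc
    have hl : ((a :: b :: rest).length + 1) / 2 = (rest.length + 1) / 2 + 1 := by
      simp only [List.length_cons]; omega
    rw [hl, List.range_succ_eq_map, List.foldl_cons, List.foldl_map]
    have hf : (fun (acc : List Char) (k : Nat) => pvStepA (a :: b :: rest) acc ((2 * (k + 1) : Nat) : Int))
        = fun acc k => pvStepA rest acc ((2 * k : Nat) : Int) := by
      funext acc k; exact pvStepA_shift a b rest acc k
    simp only [Nat.succ_eq_add_one] at hf ⊢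
    rw [hf]
    rw [pvStepA_head, ih, pvGoB]
    simp
  | case2 cs h =>
    intro acc
    rcases cs with _ | ⟨a, _ | ⟨b, rest⟩⟩
    · simp [pvGoB]
    case cons.cons => exact (h a b rest rfl).elim
    · rw [show (([a] : List Char).length + 1) / 2 = 1 by simp]
      simp only [List.range_one, List.foldl_cons, List.foldl_nil]
      unfold pvStepA
      rw [show ((2 * 0 : Nat) : Int) = ((0:Nat) : Int) from by norm_num,
          show ((0:Nat):Int) + 2 = ((2:Nat):Int) from by norm_num, PySem.List.slice_natCast]
      simp [pvTable_get_one, pvGoB]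

-- ===== VERDICT (by name: the statement is the Claim_ definition above) =====
theorem reduce_to_20_characters_spec : Claim_equal_reduce_to_20_characters := by
  intro s _
  unfold Spec_reduce_to_20_characters reduce_to_20_characters reduce_to_20_characters_alt
  have hlen : PySem.Str.len s = ((s.toList.length : Nat) : Int) := by simp [PySem.Str.len_eq]
  rw [hlen, pvRangeA, List.foldl_map, pvLoopA]
  simp
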